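-- pv_equiv track=rewrite | github.com/ChrisDL34/backend_indicador_porcentaje_sincronizacion_en_correlaciones | app.py | build_pos_neg_map
-- ===== SOURCE A (Python) =====
-- from typing import Dict, List, Optional, Tuple
--
-- def split_pair(p: str) -> Tuple[str, str]:
--     return p[:3], p[3:]
--
-- def build_pos_neg_map(pairs: List[str]):
--     """Mapa de correlaciones solo para el universo dado (pares disponibles)."""
--     info = {}
--     bases = {p: split_pair(p)[0] for p in pairs}
--     quotes = {p: split_pair(p)[1] for p in pairs}
--     for p in pairs:
--         b, q = bases[p], quotes[p]
--         pos, neg = [], []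
--         for o in pairs:
--             if o == p:
--                 continue
--             bo, qo = bases[o], quotes[o]
--             # Positiva: comparten base o comparten cotizada
--             if b == bo or q == qo:
--                 pos.append(o)
--             # Negativa: base de uno = cotizada del otro (o viceversa)
--             if b == qo or q == bo:
--                 neg.append(o)
--         info[p] = {"positives": pos, "negatives": neg}
--     return info
-- ===== SOURCE B (Python) =====
-- from typing import List
--
-- def _merge(xs, ys):
--     """Merge two strictly increasing index lists, keeping each index once."""
--     out = []
--     i = j = 0
--     while i < len(xs) and j < len(ys):
--         if xs[i] < ys[j]:
--             out.append(xs[i]); i += 1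
--         elif ys[j] < xs[i]:
--             out.append(ys[j]); j += 1
--         else:
--             out.append(xs[i]); i += 1; j += 1
--     out.extend(xs[i:])
--     out.extend(ys[j:])
--     return out
--
-- def build_pos_neg_map(pairs: List[str]):
--     """Mapa de correlaciones solo para el universo dado (pares disponibles)."""
--     base_idx = {}
--     quote_idx = {}
--     for i, p in enumerate(pairs):
--         base_idx.setdefault(p[:3], []).append(i)
--         quote_idx.setdefault(p[3:], []).append(i)
--     info = {}
--     for p in pairs:
--         if p in info:
--             continue
--         b, q = p[:3], p[3:]
--         pos = [pairs[i] for i in _merge(base_idx.get(b, []), quote_idx.get(q, [])) if pairs[i] != p]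
--         neg = [pairs[i] for i in _merge(base_idx.get(q, []), quote_idx.get(b, [])) if pairs[i] != p]
--         info[p] = {"positives": pos, "negatives": neg}
--     return info
-- ===== Notes on version B (the rewrite author's own statement) =====
-- stated objective: faster
-- what changed: Instead of A's nested all-pairs scan, B indexes the pairs once by base and by quote currency (one enumerate pass building two dicts of sorted index lists) and, per distinct pair, merges the relevant ordered index groups, so each result list is produced output-sensitively rather than by rescanning the whole universe.
import Mathlib
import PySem

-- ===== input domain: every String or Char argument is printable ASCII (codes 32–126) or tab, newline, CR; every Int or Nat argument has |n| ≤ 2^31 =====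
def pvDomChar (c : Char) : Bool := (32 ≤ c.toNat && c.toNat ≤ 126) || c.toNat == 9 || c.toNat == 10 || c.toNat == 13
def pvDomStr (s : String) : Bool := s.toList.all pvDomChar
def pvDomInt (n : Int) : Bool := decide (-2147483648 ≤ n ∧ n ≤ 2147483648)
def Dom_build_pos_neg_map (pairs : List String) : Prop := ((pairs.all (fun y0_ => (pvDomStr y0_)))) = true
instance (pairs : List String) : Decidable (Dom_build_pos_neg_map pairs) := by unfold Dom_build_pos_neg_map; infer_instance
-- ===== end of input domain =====

-- B replaces A's quadratic all-pairs scan by indexing the pairs once by base and by quote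
-- currency and, per distinct pair, merging the relevant ordered index groups (output-sensitive).

-- ===== PORT A =====
def split_pair (p : String) : String × String :=
  (PySem.Str.slice p none (some 3), PySem.Str.slice p (some 3) none)

def build_pos_neg_map (pairs : List String) : List (String × List (String × List String)) :=
  -- bases = {p: split_pair(p)[0] for p in pairs}; quotes likewise
  let bases : PySem.Dict String String :=
    pairs.foldl (fun d p => d.insert p (split_pair p).1) PySem.Dict.empty
  let quotes : PySem.Dict String String :=
    pairs.foldl (fun d p => d.insert p (split_pair p).2) PySem.Dict.empty
  let info : PySem.Dict String (List (String × List String)) :=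
    pairs.foldl (fun info p =>
      -- bases[p] / quotes[p]: p ∈ pairs, so the key is always present (never a KeyError)
      let b := (bases.get? p).getD ""
      let q := (quotes.get? p).getD ""
      let pn : List String × List String :=
        pairs.foldl (fun pn o =>
          if o == p then pn
          else
            let bo := (bases.get? o).getD ""
            let qo := (quotes.get? o).getD ""
            let pn := if b == bo || q == qo then (pn.1 ++ [o], pn.2) else pn
            if b == qo || q == bo then (pn.1, pn.2 ++ [o]) else pn) ([], [])
      info.insert p [("positives", pn.1), ("negatives", pn.2)]) PySem.Dict.empty
  info.items

-- ===== PORT B =====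
-- _merge: two-pointer merge of two strictly increasing index lists, keeping each index once
def mergeIdx : List Int → List Int → List Int
  | [], ys => ys
  | x :: xs, [] => x :: xs
  | x :: xs, y :: ys =>
    if x < y then x :: mergeIdx xs (y :: ys)
    else if y < x then y :: mergeIdx (x :: xs) ys
    else x :: mergeIdx xs ys
termination_by xs ys => xs.length + ys.length

def build_pos_neg_map_alt (pairs : List String) : List (String × List (String × List String)) :=
  -- for i, p in enumerate(pairs): base_idx.setdefault(p[:3],[]).append(i); quote_idx.setdefault(p[3:],[]).append(i)
  let idx : PySem.Dict String (List Int) × PySem.Dict String (List Int) :=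
    (PySem.List.enumerate pairs 0).foldl
      (fun dd ip =>
        (dd.1.modify (PySem.Str.slice ip.2 none (some 3)) [] (· ++ [ip.1]),
         dd.2.modify (PySem.Str.slice ip.2 (some 3) none) [] (· ++ [ip.1])))
      (PySem.Dict.empty, PySem.Dict.empty)
  let base_idx := idx.1
  let quote_idx := idx.2
  let info : PySem.Dict String (List (String × List String)) :=
    pairs.foldl (fun info p =>
      if info.contains p then info
      else
        let b := PySem.Str.slice p none (some 3)
        let q := PySem.Str.slice p (some 3) none
        -- pairs[i]: every stored index is in range, so the default of pyGetD is never used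
        let pos := ((mergeIdx (base_idx.getD b []) (quote_idx.getD q [])).filter
            (fun i => !(PySem.List.pyGetD pairs i "" == p))).map (fun i => PySem.List.pyGetD pairs i "")
        let neg := ((mergeIdx (base_idx.getD q []) (quote_idx.getD b [])).filter
            (fun i => !(PySem.List.pyGetD pairs i "" == p))).map (fun i => PySem.List.pyGetD pairs i "")
        info.insert p [("positives", pos), ("negatives", neg)]) PySem.Dict.empty
  info.items

-- ===== PRECONDITION & SPEC =====
def Spec_build_pos_neg_map (pairs : List String) (out : List (String × List (String × List String))) : Prop := out = build_pos_neg_map_alt pairs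
instance (pairs : List String) (out : List (String × List (String × List String))) : Decidable (Spec_build_pos_neg_map pairs out) := by unfold Spec_build_pos_neg_map; infer_instance

-- ===== CLAIM (what is proved, stated in full; the proofs are below) =====
def Claim_equal_build_pos_neg_map : Prop := ∀ (pairs : List String), Dom_build_pos_neg_map pairs → Spec_build_pos_neg_map pairs (build_pos_neg_map pairs)

-- ===== LEMMAS AND PROOFS =====

-- the common per-key value both programs compute
def pvVal (pairs : List String) (p : String) : List (String × List String) :=
  [("positives", pairs.filter (fun o =>
      !(o == p) && ((split_pair p).1 == (split_pair o).1 || (split_pair p).2 == (split_pair o).2))),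
   ("negatives", pairs.filter (fun o =>
      !(o == p) && ((split_pair p).1 == (split_pair o).2 || (split_pair p).2 == (split_pair o).1)))]

-- a dict comprehension {p: f(p) for p in l}: lookup of a member is f of it
lemma get?_foldl_insert_fun (f : String → String) (l : List String)
    (d : PySem.Dict String String) (x : String) :
    (l.foldl (fun d p => d.insert p (f p)) d).get? x =
      if x ∈ l then some (f x) else d.get? x := by
  induction l generalizing d with
  | nil => simp
  | cons a t ih =>
      simp only [List.foldl_cons, ih, PySem.Dict.get?_insert, List.mem_cons]
      by_cases hx : x ∈ t <;> by_cases ha : x = a <;> simp [hx, ha]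

lemma enumerate_eq (xs : List String) : ∀ (s : Int),
    PySem.List.enumerate xs s =
      (List.range xs.length).map (fun (k : Nat) => (s + (k : Int), xs.getD k "")) := by
  induction xs with
  | nil => intro s; simp [PySem.List.enumerate]
  | cons x t ih =>
      intro s
      simp only [PySem.List.enumerate, List.length_cons, List.range_succ_eq_map,
        List.map_cons, List.map_map, ih (s + 1), List.cons.injEq]
      refine ⟨by simp, ?_⟩
      refine List.map_congr_left fun k _ => ?_
      simp only [Function.comp, Nat.succ_eq_add_one, Prod.mk.injEq]
      constructor
      · push_cast; ring
      · rfl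

lemma mergeIdx_nil_right (xs : List Int) : mergeIdx xs [] = xs := by
  cases xs <;> simp [mergeIdx]

lemma mergeIdx_cons_lt (x : Int) (xs ys : List Int) (h : ∀ y ∈ ys, x < y) :
    mergeIdx (x :: xs) ys = x :: mergeIdx xs ys := by
  cases ys with
  | nil => simp [mergeIdx_nil_right]
  | cons y ys => simp [mergeIdx, h y (by simp)]

lemma mergeIdx_lt_cons (y : Int) (xs ys : List Int) (h : ∀ x ∈ xs, y < x) :
    mergeIdx xs (y :: ys) = y :: mergeIdx xs ys := by
  cases xs with
  | nil => simp [mergeIdx]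
  | cons x xs =>
      have hx := h x (by simp)
      simp [mergeIdx, hx, Int.lt_asymm hx]

lemma mergeIdx_filter (pa pb : Int → Bool) :
    ∀ (r : List Int), r.Pairwise (· < ·) →
      mergeIdx (r.filter pa) (r.filter pb) = r.filter (fun i => pa i || pb i) := by
  intro r
  induction r with
  | nil => intro _; simp [mergeIdx]
  | cons a t ih =>
      intro h
      rw [List.pairwise_cons] at h
      obtain ⟨ha, ht⟩ := h
      have hmem : ∀ (p : Int → Bool), ∀ y ∈ t.filter p, a < y := by
        intro p y hy; exact ha y (List.mem_of_mem_filter hy)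
      cases hpa : pa a <;> cases hpb : pb a <;>
        simp only [List.filter_cons, hpa, hpb, Bool.or_self,
          Bool.false_or, Bool.or_false, Bool.false_eq_true, if_true, if_false]
      · exact ih ht
      · rw [mergeIdx_lt_cons a _ _ (hmem pa), ih ht]
      · rw [mergeIdx_cons_lt a _ _ (hmem pb), ih ht]
      · rw [show mergeIdx (a :: t.filter pa) (a :: t.filter pb) =
            a :: mergeIdx (t.filter pa) (t.filter pb) by simp [mergeIdx], ih ht]

lemma map_getD_range (xs : List String) :
    (List.range xs.length).map (fun k => xs.getD k "") = xs := by
  induction xs with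
  | nil => simp
  | cons x t ih =>
      simp only [List.length_cons, List.range_succ_eq_map, List.map_cons, List.map_map,
        List.cons.injEq]
      refine ⟨rfl, ?_⟩
      rw [show ((fun k => (x :: t).getD k "") ∘ Nat.succ) = fun k => t.getD k "" from rfl, ih]

-- the unconditional insert loop equals the guarded one when the value is a function of the key
lemma foldl_insert_eq_guarded (v : String → List (String × List String)) :
    ∀ (l : List String) (d : PySem.Dict String (List (String × List String))),
      (∀ kv ∈ d.items, kv.2 = v kv.1) →
      l.foldl (fun d p => d.insert p (v p)) d =
        l.foldl (fun d p => if d.contains p then d else d.insert p (v p)) d := by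
  intro l
  induction l with
  | nil => intro d _; rfl
  | cons a t ih =>
      intro d hd
      simp only [List.foldl_cons]
      by_cases h : d.contains a = true
      · have heq : d.insert a (v a) = d := by
          apply PySem.Dict.ext
          rw [PySem.Dict.items_insert_of_contains d (v a) h]
          conv_rhs => rw [← List.map_id d.items]
          refine List.map_congr_left fun kv hkv => ?_
          by_cases hk : (kv.1 == a) = true
          · have : kv.1 = a := by simpa using hk
            have hv := hd kv hkv
            rw [if_pos hk, ← this, ← hv]; simp
          · simp [hk]
        rw [heq, h, if_pos rfl]
        exact ih d hd
      · rw [if_neg (by simp [h])]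
        refine ih _ ?_
        intro kv hkv
        rw [PySem.Dict.items_insert_of_not_contains d (v a) (by simpa using h)] at hkv
        rcases List.mem_append.mp hkv with h1 | h1
        · exact hd kv h1
        · simp at h1; simp [h1]

lemma portA_eq (pairs : List String) :
    build_pos_neg_map pairs =
      (pairs.foldl (fun d p => d.insert p (pvVal pairs p)) PySem.Dict.empty).items := by
  unfold build_pos_neg_map
  dsimp only
  congr 1
  refine PySem.List.foldl_congr_mem pairs _ _ _ ?_
  intro acc p hp
  simp only [get?_foldl_insert_fun, hp, if_pos, Option.getD_some]
  congr 1
  unfold pvVal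
  rw [PySem.List.foldl_congr_mem pairs _
    (fun (pn : List String × List String) o =>
      (if !(o == p) && ((split_pair p).1 == (split_pair o).1 || (split_pair p).2 == (split_pair o).2)
        then pn.1 ++ [o] else pn.1,
       if !(o == p) && ((split_pair p).1 == (split_pair o).2 || (split_pair p).2 == (split_pair o).1)
        then pn.2 ++ [o] else pn.2)) ([], []) ?_]
  · rw [PySem.List.foldl_prod_mk
      (f := fun (acc : List String) o =>
        if !(o == p) && ((split_pair p).1 == (split_pair o).1 || (split_pair p).2 == (split_pair o).2)
        then acc ++ [o] else acc)
      (g := fun (acc : List String) o =>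
        if !(o == p) && ((split_pair p).1 == (split_pair o).2 || (split_pair p).2 == (split_pair o).1)
        then acc ++ [o] else acc)]
    rw [PySem.List.foldl_append_if _ (fun o => o), PySem.List.foldl_append_if _ (fun o => o)]
    simp
  · intro acc o ho
    simp only [ho, if_pos, Option.getD_some]
    by_cases h1 : o = p
    · simp [h1]
    · have : (o == p) = false := by simp [h1]
      simp only [this, Bool.false_eq_true, if_false, Bool.not_false, Bool.true_and]
      by_cases h2 : ((split_pair p).1 == (split_pair o).1 || (split_pair p).2 == (split_pair o).2) = true <;>
        by_cases h3 : ((split_pair p).1 == (split_pair o).2 || (split_pair p).2 == (split_pair o).1) = true <;>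
          simp [h2, h3]

lemma beq_symm_str (a b : String) : (a == b) = (b == a) := by
  by_cases h : a = b
  · simp [h]
  · simp [h, Ne.symm h]

lemma getD_idx (pairs : List String) (sel : String → String) (c : String) :
    ((PySem.List.enumerate pairs 0).foldl
        (fun d ip => d.modify (sel ip.2) [] (· ++ [ip.1])) PySem.Dict.empty).getD c []
      = ((List.range pairs.length).filter (fun k => sel (pairs.getD k "") == c)).map
          (fun (k : Nat) => (k : Int)) := by
  have h := PySem.Dict.getD_foldl_modify_append
      ((PySem.List.enumerate pairs 0).map (fun ip => (sel ip.2, ip.1)))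
      PySem.Dict.empty c
  rw [List.foldl_map] at h
  dsimp only at h
  rw [h, enumerate_eq pairs 0]
  simp [Function.comp_def]
  rw [List.filter_map, List.map_map]
  rfl

lemma filterR_eq (pairs : List String) (P : String → Bool) :
    ((List.range pairs.length).filter (fun k => P (pairs.getD k ""))).map (fun (k : Nat) => (k : Int))
      = ((List.range pairs.length).map (fun (k : Nat) => (k : Int))).filter
          (fun i => P (PySem.List.pyGetD pairs i "")) := by
  rw [List.filter_map]
  refine congrArg _ (List.filter_congr fun k _ => ?_)
  simp [PySem.List.pyGetD_natCast]

lemma pairwise_R (n : Nat) :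
    ((List.range n).map (fun (k : Nat) => (k : Int))).Pairwise (· < ·) := by
  refine List.Pairwise.map _ ?_ List.pairwise_lt_range
  intro a b hab
  exact_mod_cast hab

lemma merged_eq (pairs : List String) (P1 P2 : String → Bool) :
    mergeIdx
        (((List.range pairs.length).filter (fun k => P1 (pairs.getD k ""))).map (fun (k : Nat) => (k : Int)))
        (((List.range pairs.length).filter (fun k => P2 (pairs.getD k ""))).map (fun (k : Nat) => (k : Int)))
      = ((List.range pairs.length).filter
          (fun k => P1 (pairs.getD k "") || P2 (pairs.getD k ""))).map (fun (k : Nat) => (k : Int)) := by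
  rw [filterR_eq pairs P1, filterR_eq pairs P2,
    mergeIdx_filter _ _ _ (pairwise_R pairs.length)]
  exact (filterR_eq pairs (fun o => P1 o || P2 o)).symm

lemma mapped_filter_eq (pairs : List String) (P Q : String → Bool) :
    ((((List.range pairs.length).filter (fun k => Q (pairs.getD k ""))).map
        (fun (k : Nat) => (k : Int))).filter (fun i => P (PySem.List.pyGetD pairs i ""))).map
        (fun i => PySem.List.pyGetD pairs i "")
      = pairs.filter (fun o => P o && Q o) := by
  rw [List.filter_map, List.map_map, List.filter_filter]
  conv_rhs => rw [← map_getD_range pairs, List.filter_map]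
  simp only [Function.comp_def, PySem.List.pyGetD_natCast]

lemma portB_eq (pairs : List String) :
    build_pos_neg_map_alt pairs =
      (pairs.foldl (fun d p => if d.contains p then d else d.insert p (pvVal pairs p))
        PySem.Dict.empty).items := by
  unfold build_pos_neg_map_alt
  dsimp only
  rw [PySem.List.foldl_prod_mk
    (f := fun (d : PySem.Dict String (List Int)) (ip : Int × String) =>
      d.modify (PySem.Str.slice ip.2 none (some 3)) [] (· ++ [ip.1]))
    (g := fun (d : PySem.Dict String (List Int)) (ip : Int × String) =>
      d.modify (PySem.Str.slice ip.2 (some 3) none) [] (· ++ [ip.1]))]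
  congr 1
  refine PySem.List.foldl_congr_mem pairs _ _ _ ?_
  intro acc p _
  by_cases hc : acc.contains p
  · simp [hc]
  · simp only [hc, Bool.false_eq_true, if_false]
    congr 1
    rw [getD_idx pairs (fun s => PySem.Str.slice s none (some 3)),
      getD_idx pairs (fun s => PySem.Str.slice s (some 3) none),
      getD_idx pairs (fun s => PySem.Str.slice s (some 3) none),
      getD_idx pairs (fun s => PySem.Str.slice s none (some 3)),
      merged_eq pairs (fun o => PySem.Str.slice o none (some 3) == PySem.Str.slice p none (some 3))
        (fun o => PySem.Str.slice o (some 3) none == PySem.Str.slice p (some 3) none),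
      merged_eq pairs (fun o => PySem.Str.slice o none (some 3) == PySem.Str.slice p (some 3) none)
        (fun o => PySem.Str.slice o (some 3) none == PySem.Str.slice p none (some 3)),
      mapped_filter_eq pairs (fun o => !(o == p))
        (fun o => PySem.Str.slice o none (some 3) == PySem.Str.slice p none (some 3) ||
          PySem.Str.slice o (some 3) none == PySem.Str.slice p (some 3) none),
      mapped_filter_eq pairs (fun o => !(o == p))
        (fun o => PySem.Str.slice o none (some 3) == PySem.Str.slice p (some 3) none ||
          PySem.Str.slice o (some 3) none == PySem.Str.slice p none (some 3))]
    unfold pvVal split_pair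
    refine congrArg₂ _ (congrArg _ ?_) (congrArg (fun l => [l]) (congrArg _ ?_)) <;>
      refine List.filter_congr fun o _ => ?_ <;>
        (dsimp only
         rw [beq_symm_str (PySem.Str.slice o none (some 3)),
           beq_symm_str (PySem.Str.slice o (some 3) none)]
         all_goals rw [Bool.or_comm])

-- ===== VERDICT (by name: the statement is the Claim_ definition above) =====
theorem build_pos_neg_map_spec : Claim_equal_build_pos_neg_map := by
  intro pairs _
  unfold Spec_build_pos_neg_map
  rw [portA_eq, portB_eq, foldl_insert_eq_guarded (pvVal pairs) pairs PySem.Dict.empty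
    (by intro kv h; simp [PySem.Dict.empty] at h)]
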